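-- pv_equiv track=rewrite | github.com/tmoore44a-ship-it/ai-job-assistant | main.py | format_cover_letter
-- ===== SOURCE A (Python) =====
-- def sanitize_model_text(text):
--     """
--     Normalize possibly-empty text values from forms, DB rows, or AI output.
--     """
--     return (text or "").strip()
--
-- def format_cover_letter(text):
--     """
--     Normalize the cover-letter block into readable paragraphs.
--     """
--     cleaned = sanitize_model_text(text)
--     if not cleaned:
--         return ""
--
--     lines = [line.strip() for line in cleaned.splitlines()]
--     paragraphs = []
--     current_paragraph = []
--
--     for line in lines:
--         if not line:
--             if current_paragraph:
--                 paragraphs.append(" ".join(current_paragraph).strip())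
--                 current_paragraph = []
--             continue
--         current_paragraph.append(line)
--
--     if current_paragraph:
--         paragraphs.append(" ".join(current_paragraph).strip())
--
--     return "\n\n".join(paragraphs).strip()
-- ===== SOURCE B (Python) =====
-- def format_cover_letter(text):
--     cleaned = (text or "").strip()
--     if not cleaned:
--         return ""
--     lines = [line.strip() for line in cleaned.splitlines()]
--     # Stage 1: record the positions of all blank lines, with sentinels on both ends.
--     breaks = [-1] + [i for i, line in enumerate(lines) if not line] + [len(lines)]
--     # Stage 2: each pair of consecutive breaks that encloses at least one line
--     # delimits one paragraph; slice it out and join it.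
--     paragraphs = [" ".join(lines[a + 1:b]).strip()
--                   for a, b in zip(breaks, breaks[1:]) if b - a > 1]
--     return "\n\n".join(paragraphs).strip()
-- ===== Notes on version B (the rewrite author's own statement) =====
-- stated objective: alternative
-- what changed: A's single streaming pass with a current-paragraph accumulator and flush points is replaced by staged index arithmetic: one pass collects the positions of blank lines (with sentinels), then paragraphs are cut out of the line list as slices between consecutive blank positions and joined.
import Mathlib
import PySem

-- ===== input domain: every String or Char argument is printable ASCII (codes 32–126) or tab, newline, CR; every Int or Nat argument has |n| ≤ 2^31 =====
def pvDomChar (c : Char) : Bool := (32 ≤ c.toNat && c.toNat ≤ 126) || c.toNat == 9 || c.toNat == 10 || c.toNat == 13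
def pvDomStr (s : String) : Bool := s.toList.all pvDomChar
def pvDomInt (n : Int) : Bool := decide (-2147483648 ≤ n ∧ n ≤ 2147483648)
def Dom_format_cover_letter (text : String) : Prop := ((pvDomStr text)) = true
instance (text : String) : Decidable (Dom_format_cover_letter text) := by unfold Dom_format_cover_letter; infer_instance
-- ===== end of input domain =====

-- B replaces A's streaming accumulator loop by staged index arithmetic: collect blank-line
-- positions, then cut each paragraph out as a slice between consecutive blank positions (alternative; same cost).

-- ===== PORT A =====
def format_cover_letter (text : String) : String :=
  let cleaned := PySem.Str.strip text   -- (text or "") is the identity on a genuine str argument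
  if cleaned = "" then ""
  else
    let lines := (PySem.Str.splitlines cleaned).map PySem.Str.strip
    let st := lines.foldl
      (fun (st : List String × List String) line =>
        if line = "" then
          if st.2 = [] then st
          else (st.1 ++ [PySem.Str.strip (PySem.Str.join " " st.2)], ([] : List String))
        else (st.1, st.2 ++ [line])) (([] : List String), ([] : List String))
    let paragraphs := if st.2 = [] then st.1
      else st.1 ++ [PySem.Str.strip (PySem.Str.join " " st.2)]
    PySem.Str.strip (PySem.Str.join "\n\n" paragraphs)

-- ===== PORT B =====
def format_cover_letter_alt (text : String) : String :=
  let cleaned := PySem.Str.strip text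
  if cleaned = "" then ""
  else
    let lines := (PySem.Str.splitlines cleaned).map PySem.Str.strip
    let breaks : List Int :=
      [-1] ++ ((PySem.List.enumerate lines).filter (fun p => p.2 == "")).map (fun p => p.1)
        ++ [(lines.length : Int)]
    let paragraphs := ((breaks.zip breaks.tail).filter (fun p => decide (p.2 - p.1 > 1))).map
        (fun p => PySem.Str.strip (PySem.Str.join " " (PySem.List.slice lines (some (p.1 + 1)) (some p.2))))
    PySem.Str.strip (PySem.Str.join "\n\n" paragraphs)

-- ===== PRECONDITION & SPEC =====
def Spec_format_cover_letter (text : String) (out : String) : Prop := out = format_cover_letter_alt text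
instance (text : String) (out : String) : Decidable (Spec_format_cover_letter text out) := by unfold Spec_format_cover_letter; infer_instance

-- ===== CLAIM (what is proved, stated in full; the proofs are below) =====
def Claim_equal_format_cover_letter : Prop := ∀ (text : String), Dom_format_cover_letter text → Spec_format_cover_letter text (format_cover_letter text)

-- ===== LEMMAS AND PROOFS =====

def pvP (l : List String) : String := PySem.Str.strip (PySem.Str.join " " l)

-- A's loop, as a recursion over the remaining lines with the open paragraph as accumulator
def pvAuxA (cur : List String) : List String → List String
  | [] => if cur = [] then [] else [pvP cur]
  | x :: xs =>
      if x = "" then (if cur = [] then pvAuxA [] xs else pvP cur :: pvAuxA [] xs)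
      else pvAuxA (cur ++ [x]) xs

-- reference recursion: paragraphs as maximal nonblank runs
def pvRec : List String → List String
  | [] => []
  | x :: xs =>
      if x = "" then pvRec xs
      else pvP (x :: xs.takeWhile (fun y => !(y == ""))) :: pvRec (xs.dropWhile (fun y => !(y == "")))
  termination_by l => l.length
  decreasing_by
    · simp
    · simpa using Nat.lt_succ_of_le (List.length_dropWhile_le _ _)

-- B's blank-position pass, from an arbitrary start offset
def pvBlk (s : Nat) (ls : List String) : List Int :=
  ((PySem.List.enumerate ls (s : Int)).filter (fun p => p.2 == "")).map (fun p => p.1)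

-- B's consecutive-pairs pass, with the left break as accumulator
def pvPairs (ls : List String) (a : Int) : List Int → List String
  | [] => []
  | b :: rest =>
      (if b - a > 1 then [pvP (PySem.List.slice ls (some (a + 1)) (some b))] else [])
        ++ pvPairs ls b rest

theorem pvFoldA_eq (ls ps cur : List String) :
    (let st := ls.foldl
      (fun (st : List String × List String) line =>
        if line = "" then
          if st.2 = [] then st
          else (st.1 ++ [PySem.Str.strip (PySem.Str.join " " st.2)], ([] : List String))
        else (st.1, st.2 ++ [line])) (ps, cur);
     if st.2 = [] then st.1
     else st.1 ++ [PySem.Str.strip (PySem.Str.join " " st.2)]) = ps ++ pvAuxA cur ls := by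
  induction ls generalizing ps cur with
  | nil => simp [pvAuxA, pvP]; split_ifs <;> simp
  | cons x xs ih =>
      simp only [List.foldl_cons]
      by_cases hx : x = "" <;> by_cases hc : cur = [] <;>
        simp [pvAuxA, pvP, hx, hc, ih]

theorem pvAuxA_open (ls : List String) : ∀ cur : List String, cur ≠ [] →
    pvAuxA cur ls = pvP (cur ++ ls.takeWhile (fun y => !(y == "")))
      :: pvAuxA [] (ls.dropWhile (fun y => !(y == ""))) := by
  induction ls with
  | nil => intro cur hc; simp [pvAuxA, hc]
  | cons x xs ih =>
      intro cur hc
      by_cases hx : x = ""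
      · simp [pvAuxA, hx, hc]
      · have hne : cur ++ [x] ≠ [] := by simp
        simp [pvAuxA, hx, ih _ hne]

theorem pvAuxA_eq_pvRec : ∀ (n : ℕ) (ls : List String), ls.length ≤ n →
    pvAuxA [] ls = pvRec ls := by
  intro n
  induction n with
  | zero => intro ls h; simp at h; simp [h, pvAuxA, pvRec]
  | succ n ih =>
      intro ls h
      cases ls with
      | nil => simp [pvAuxA, pvRec]
      | cons x xs =>
          by_cases hx : x = ""
          · subst hx
            have hlen : xs.length ≤ n := by simpa using h
            rw [pvRec]
            simpa [pvAuxA] using ih xs hlen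
          · have hne : ([x] : List String) ≠ [] := by simp
            have hlen : (xs.dropWhile (fun y => !(y == ""))).length ≤ n :=
              le_trans (List.length_dropWhile_le _ _) (by simpa using h)
            rw [pvRec]
            simp only [hx]
            have hstep : pvAuxA [] (x :: xs) = pvAuxA [x] xs := by simp [pvAuxA, hx]
            rw [hstep, pvAuxA_open xs [x] hne, ih _ hlen]
            simp

theorem pvRec_nil : pvRec [] = [] := by rw [pvRec]

theorem pvRec_blank (xs : List String) : pvRec ("" :: xs) = pvRec xs := by
  rw [pvRec]; simp

theorem pvBlk_nil (s : Nat) : pvBlk s [] = [] := by simp [pvBlk, PySem.List.enumerate]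

theorem pvBlk_cons_blank (s : Nat) (xs : List String) :
    pvBlk s ("" :: xs) = (s : Int) :: pvBlk (s + 1) xs := by
  simp [pvBlk, PySem.List.enumerate_cons]

theorem pvBlk_cons_nonblank (s : Nat) (x : String) (xs : List String) (hx : ¬ x = "") :
    pvBlk s (x :: xs) = pvBlk (s + 1) xs := by
  simp [pvBlk, PySem.List.enumerate_cons, hx]

theorem pvBlk_append_nonblank (t d : List String) (ht : ∀ y ∈ t, ¬ y = "") :
    ∀ s : Nat, pvBlk s (t ++ d) = pvBlk (s + t.length) d := by
  induction t with
  | nil => intro s; simp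
  | cons y ys ih =>
      intro s
      have hy : ¬ y = "" := ht y (by simp)
      have := ih (fun z hz => ht z (by simp [hz]))
      rw [List.cons_append, pvBlk_cons_nonblank _ _ _ hy, this (s + 1)]
      congr 1
      simp
      omega

theorem pvPairs_nil (ls : List String) (a : Int) : pvPairs ls a [] = [] := by rw [pvPairs]

theorem pvPairs_cons_skip (ls : List String) (a b : Int) (rest : List Int)
    (hb : ¬ b - a > 1) : pvPairs ls a (b :: rest) = pvPairs ls b rest := by
  rw [pvPairs, if_neg hb, List.nil_append]

theorem pvPairs_cons_take (ls : List String) (a b : Int) (rest : List Int)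
    (hb : b - a > 1) : pvPairs ls a (b :: rest)
      = pvP (PySem.List.slice ls (some (a + 1)) (some b)) :: pvPairs ls b rest := by
  rw [pvPairs, if_pos hb, List.singleton_append]

theorem pvZip_eq_pvPairs (ls : List String) :
    ∀ (rest : List Int) (a : Int),
    (((a :: rest).zip (a :: rest).tail).filter (fun p => decide (p.2 - p.1 > 1))).map
        (fun p => PySem.Str.strip (PySem.Str.join " " (PySem.List.slice ls (some (p.1 + 1)) (some p.2))))
      = pvPairs ls a rest := by
  intro rest
  induction rest with
  | nil => intro a; simp [pvPairs]
  | cons b r ih =>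
      intro a
      by_cases hb : b - a > 1 <;>
        simp [pvPairs, hb, pvP, ← ih b]

theorem pvPairs_eq_pvRec : ∀ (n : ℕ) (suf pre : List String), suf.length ≤ n →
    pvPairs (pre ++ suf) ((pre.length : Int) - 1)
      (pvBlk pre.length suf ++ [(pre.length : Int) + suf.length]) = pvRec suf := by
  intro n
  induction n with
  | zero =>
      intro suf pre h
      simp at h
      subst h
      rw [pvBlk_nil, List.nil_append, pvPairs_cons_skip _ _ _ _ (by simp),
        pvPairs_nil, pvRec_nil]
  | succ n ih =>
      intro suf pre h
      cases suf with
      | nil =>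
          rw [pvBlk_nil, List.nil_append, pvPairs_cons_skip _ _ _ _ (by simp),
            pvPairs_nil, pvRec_nil]
      | cons x xs =>
          by_cases hx : x = ""
          · subst hx
            rw [pvBlk_cons_blank, List.cons_append,
              pvPairs_cons_skip _ _ _ _ (by omega), pvRec_blank]
            have hlen : xs.length ≤ n := by simpa using h
            have this1 := ih xs (pre ++ [""]) hlen
            have hL : (pre ++ [""]).length = pre.length + 1 := by simp
            rw [hL, List.append_assoc] at this1
            simp only [List.singleton_append] at this1
            have e1 : ((pre.length + 1 : Nat) : Int) - 1 = (pre.length : Int) := by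
              push_cast; ring
            have e2 : ((pre.length + 1 : Nat) : Int) + (xs.length : Int)
                = (pre.length : Int) + ((("" :: xs).length : Nat) : Int) := by
              push_cast [List.length_cons]; ring
            rw [e1, e2] at this1
            exact this1
          · rw [pvRec, if_neg hx]
            have hxs := (List.takeWhile_append_dropWhile
              (p := fun y => !(y == "")) (l := xs)).symm
            have htnb : ∀ y ∈ xs.takeWhile (fun y => !(y == "")), ¬ y = "" := by
              intro y hy
              have := List.mem_takeWhile_imp hy
              simpa using this
            have hhead : ∀ z d', xs.dropWhile (fun y => !(y == "")) = z :: d' → z = "" := by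
              intro z d' hzd
              have hne : xs.dropWhile (fun y => !(y == "")) ≠ [] := by simp [hzd]
              have := List.head_dropWhile_not (p := fun y => !(y == "")) hne
              simp [hzd] at this
              exact this
            generalize hT : xs.takeWhile (fun y => !(y == "")) = t at hxs htnb ⊢
            generalize hD : xs.dropWhile (fun y => !(y == "")) = d at hxs hhead ⊢
            have hblk : pvBlk pre.length (x :: xs) = pvBlk (pre.length + 1 + t.length) d := by
              rw [pvBlk_cons_nonblank _ _ _ hx, hxs, pvBlk_append_nonblank t d htnb]
            rw [hblk]
            cases d with
            | nil =>
                have hxt : xs = t := by simpa using hxs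
                rw [pvBlk_nil, List.nil_append,
                  pvPairs_cons_take _ _ _ _ (by simp [List.length_cons]), pvPairs_nil]
                have e1 : (pre.length : Int) - 1 + 1 = ((pre.length : Nat) : Int) := by ring
                rw [e1, PySem.List.slice_natCast_add (pre ++ x :: xs) pre.length (x :: xs).length,
                  List.drop_left, List.take_length, pvRec_nil]
                rw [hxt]
            | cons z d' =>
                have hz : z = "" := hhead z d' rfl
                subst hz
                rw [pvBlk_cons_blank, List.cons_append,
                  pvPairs_cons_take _ _ _ _ (by push_cast; omega)]
                have e1 : (pre.length : Int) - 1 + 1 = ((pre.length : Nat) : Int) := by ring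
                have e2 : ((pre.length + 1 + t.length : Nat) : Int)
                    = ((pre.length : Nat) : Int) + (((x :: t).length : Nat) : Int) := by
                  push_cast [List.length_cons]; ring
                rw [e1, e2, PySem.List.slice_natCast_add (pre ++ x :: xs) pre.length (x :: t).length,
                  List.drop_left]
                have hsplit : x :: xs = (x :: t) ++ ("" :: d') := by rw [hxs]; rfl
                rw [hsplit, List.take_left, ← hsplit]
                have hxslen : xs.length = t.length + 1 + d'.length := by
                  rw [hxs]; simp; omega
                have hlen : d'.length ≤ n := by
                  have h2 : xs.length ≤ n := by simpa using h
                  omega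
                have hih := ih d' (pre ++ x :: t ++ [""]) hlen
                have hpre' : (pre ++ x :: t ++ [""]).length = pre.length + t.length + 2 := by
                  simp; omega
                rw [hpre'] at hih
                have e3 : ((pre.length + t.length + 2 : Nat) : Int) - 1
                    = ((pre.length + 1 + t.length : Nat) : Int) := by push_cast; ring
                have e4 : ((pre.length + t.length + 2 : Nat) : Int) + (d'.length : Int)
                    = (pre.length : Int) + (((x :: xs).length : Nat) : Int) := by
                  push_cast [List.length_cons, hxslen]; ring
                have e5 : pre ++ x :: t ++ [""] ++ d' = pre ++ x :: xs := by
                  rw [hxs]; simp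
                have e6 : pre.length + t.length + 2 = pre.length + 1 + t.length + 1 := by omega
                rw [e3, e4, e5, e6, e2] at hih
                rw [hih, pvRec_blank]

theorem format_cover_letter_eq (text : String) :
    format_cover_letter text = format_cover_letter_alt text := by
  rw [format_cover_letter, format_cover_letter_alt]
  by_cases h : PySem.Str.strip text = ""
  · simp [h]
  · simp only [h, if_false]
    set ls := (PySem.Str.splitlines (PySem.Str.strip text)).map PySem.Str.strip with hls
    have hA := pvFoldA_eq ls [] []
    simp only [List.nil_append] at hA
    rw [hA, pvAuxA_eq_pvRec ls.length ls le_rfl]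
    have hB := pvZip_eq_pvPairs ls (pvBlk 0 ls ++ [(ls.length : Int)]) (-1)
    have hmain := pvPairs_eq_pvRec ls.length ls [] le_rfl
    simp only [List.length_nil, Nat.cast_zero, List.nil_append, zero_sub, zero_add] at hmain
    have hb0 : pvBlk 0 ls
        = ((PySem.List.enumerate ls).filter (fun p => p.2 == "")).map (fun p => p.1) := by
      simp [pvBlk]
    rw [hb0] at hB hmain
    simp only [List.cons_append, List.nil_append] at hB ⊢
    rw [hB, hmain]

-- ===== VERDICT (by name: the statement is the Claim_ definition above) =====
theorem format_cover_letter_spec : Claim_equal_format_cover_letter := by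
  intro text _
  exact format_cover_letter_eq text
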